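-- pv_equiv track=rewrite | github.com/setrenev/SoftUni-Software-Engineering | Python-Fundamentals/Homeworks/ListAdvanced-Exercise/07_decipher_this.py | decode_word
-- ===== SOURCE A (Python) =====
-- def decode_word(word):
--     check_digits = [word[i] for i in range(len(word)) if word[i].isdigit()]
--     first_letter = chr(int("".join(check_digits)))
--     rest_of_word = "".join([word[i] for i in range(len(word)) if word[i].isalpha()])
--     decipher_word = first_letter + rest_of_word[-1] + rest_of_word[1:-1]
--     if len(rest_of_word) > 1:
--         decipher_word += rest_of_word[0]
--
--     return decipher_word
-- ===== SOURCE B (Python) =====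
-- def decode_word(word):
--     digits = ""
--     first = last = None
--     mid = []
--     for ch in word:
--         if ch.isdigit():
--             digits += ch
--         elif ch.isalpha():
--             if first is None:
--                 first = ch
--             elif last is None:
--                 last = ch
--             else:
--                 mid.append(last)
--                 last = ch
--     head = chr(int(digits))
--     if last is None:
--         return head + first
--     return head + last + "".join(mid) + first
-- ===== Notes on version B (the rewrite author's own statement) =====
-- stated objective: alternative
-- what changed: A makes three staged index-comprehension passes, joins the letters into a string and reassembles it by slicing (rest[-1] + rest[1:-1] + conditional rest[0]); B is one streaming pass over the word maintaining a digit buffer plus first/deferred-last/middle accumulators, so no letters string, no slicing and no length branch exist.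
-- outside the precondition, e.g. on decode_word(''): A raises ValueError, B raises ValueError
import Mathlib
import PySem

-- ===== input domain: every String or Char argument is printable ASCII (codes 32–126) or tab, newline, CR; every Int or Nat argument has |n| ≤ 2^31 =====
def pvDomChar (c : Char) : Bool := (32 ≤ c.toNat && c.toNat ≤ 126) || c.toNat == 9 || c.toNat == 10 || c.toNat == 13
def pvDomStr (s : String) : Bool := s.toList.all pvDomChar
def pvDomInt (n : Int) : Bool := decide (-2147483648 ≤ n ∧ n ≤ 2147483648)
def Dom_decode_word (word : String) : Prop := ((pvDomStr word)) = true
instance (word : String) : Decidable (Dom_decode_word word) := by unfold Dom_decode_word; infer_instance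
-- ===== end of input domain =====

-- B replaces A's three staged index-comprehension passes and slice reassembly by ONE streaming
-- pass with a digit buffer and first/deferred-last/middle accumulators (objective: alternative).


-- ===== PORT A =====
def decode_word (word : String) : String :=
  let cs := word.toList
  let check_digits : List Char :=
    (PySem.List.pyRange 0 (PySem.List.len cs) 1).foldl (fun acc i =>
      if PySem.Chars.isdigit (PySem.List.pyGetD cs i ' ') then acc ++ [PySem.List.pyGetD cs i ' ']
      else acc) []
  match PySem.Int.ofChars? check_digits with
  | none => ""          -- the int conversion raises ValueError: outside Pre_
  | some n =>
    let first_letter : List Char := [Char.ofNat n.toNat]   -- chr(n); exact on the valid code points Pre_ admits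
    let rest_of_word : List Char :=
      (PySem.List.pyRange 0 (PySem.List.len cs) 1).foldl (fun acc i =>
        if PySem.Chars.isalpha (PySem.List.pyGetD cs i ' ') then acc ++ [PySem.List.pyGetD cs i ' ']
        else acc) []
    match PySem.List.pyGet? rest_of_word (-1) with
    | none => ""        -- rest_of_word[-1] raises IndexError: outside Pre_
    | some last =>
      let decipher := first_letter ++ [last] ++ PySem.List.slice rest_of_word (some 1) (some (-1))
      let decipher := if 1 < rest_of_word.length then decipher ++ [PySem.List.pyGetD rest_of_word 0 ' '] else decipher
      String.ofList decipher

-- ===== PORT B =====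
-- the loop body of B's single pass: state = (digits, first, last, mid)
def pvStepB (s : List Char × Option Char × Option Char × List Char) (ch : Char) :
    List Char × Option Char × Option Char × List Char :=
  if PySem.Chars.isdigit ch then (s.1 ++ [ch], s.2.1, s.2.2.1, s.2.2.2)
  else if PySem.Chars.isalpha ch then
    match s.2.1 with
    | none => (s.1, some ch, s.2.2.1, s.2.2.2)
    | some f =>
      match s.2.2.1 with
      | none => (s.1, some f, some ch, s.2.2.2)
      | some l => (s.1, some f, some ch, s.2.2.2 ++ [l])
  else s

def decode_word_alt (word : String) : String :=
  let st := word.toList.foldl pvStepB ([], none, none, [])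
  match PySem.Int.ofChars? st.1 with
  | none => ""          -- int('') raises ValueError: outside Pre_
  | some n =>
    let head : List Char := [Char.ofNat n.toNat]   -- chr of the collected digits
    match st.2.2.1 with
    | none =>
      match st.2.1 with
      | some f => String.ofList (head ++ [f])
      | none => ""      -- head + None raises TypeError: outside Pre_
    | some l => String.ofList (head ++ [l] ++ st.2.2.2 ++ [st.2.1.getD ' '])

-- ===== PRECONDITION & SPEC =====
-- Pre_ excludes the inputs on which A raises (no letter → IndexError; no digit character → int('')
-- ValueError; a digit value beyond the chr range → ValueError) and the inputs whose digit value is a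
-- surrogate code point, where A returns a lone-surrogate string that is not representable as a Lean String.
def Pre_decode_word (word : String) : Prop :=
  word.toList.filter (fun c => PySem.Chars.isalpha c) ≠ [] ∧
  (match PySem.Int.ofChars? (word.toList.filter (fun c => PySem.Chars.isdigit c)) with
   | some n => decide (Nat.isValidChar n.toNat)
   | none => false) = true
instance (word : String) : Decidable (Pre_decode_word word) := by unfold Pre_decode_word; infer_instance
def pvWitness_decode_word : String := "65abc"

def Spec_decode_word (word : String) (out : String) : Prop := out = decode_word_alt word
instance (word : String) (out : String) : Decidable (Spec_decode_word word out) := by unfold Spec_decode_word; infer_instance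

-- ===== CLAIM (what is proved, stated in full; the proofs are below) =====
def Claim_equal_decode_word : Prop := ∀ (word : String), Dom_decode_word word → Pre_decode_word word → Spec_decode_word word (decode_word word)

-- ===== LEMMAS AND PROOFS =====

-- A digit character is never alphabetic.
theorem pv_isalpha_of_isdigit (c : Char) (h : PySem.Chars.isdigit c = true) :
    PySem.Chars.isalpha c = false := by
  simp [PySem.Chars.isdigit, PySem.Chars.isalpha, PySem.Chars.isupper, PySem.Chars.islower,
    Char.le_def, UInt32.le_iff_toNat_le] at *
  omega

-- A's index-comprehension loops are filters.
theorem pv_index_filter (cs : List Char) (p : Char → Bool) :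
    (PySem.List.pyRange 0 (PySem.List.len cs) 1).foldl
      (fun acc i => if p (PySem.List.pyGetD cs i ' ') then acc ++ [PySem.List.pyGetD cs i ' '] else acc) []
    = cs.filter p := by
  have h1 := PySem.List.foldl_pyRange_zero_pyGetD cs ' '
      (fun acc c => if p c then acc ++ [c] else acc) ([] : List Char)
  have h2 := PySem.List.foldl_append_if_eq_filter p cs ([] : List Char)
  simpa using h1.trans h2

-- the letter-only step of B's pass, used to characterise the fold
def pvStepL (t : Option Char × Option Char × List Char) (ch : Char) :
    Option Char × Option Char × List Char :=
  match t.1 with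
  | none => (some ch, t.2.1, t.2.2)
  | some f =>
    match t.2.1 with
    | none => (some f, some ch, t.2.2)
    | some l => (some f, some ch, t.2.2 ++ [l])

-- B's single pass splits into the digit filter and the letter-only fold over the letter filter.
theorem pv_fold_split (cs : List Char) (d : List Char) (t : Option Char × Option Char × List Char) :
    cs.foldl pvStepB (d, t)
    = (d ++ cs.filter (fun c => PySem.Chars.isdigit c),
       (cs.filter (fun c => PySem.Chars.isalpha c)).foldl pvStepL t) := by
  induction cs generalizing d t with
  | nil => simp
  | cons c cs ih =>
    by_cases hd : PySem.Chars.isdigit c = true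
    · simp [List.foldl_cons, hd, pv_isalpha_of_isdigit c hd, pvStepB, ih]
    · by_cases ha : PySem.Chars.isalpha c = true
      · obtain ⟨f, l, m⟩ := t
        cases f with
        | none => simp [List.foldl_cons, hd, ha, pvStepB, pvStepL, ih]
        | some f =>
          cases l with
          | none => simp [List.foldl_cons, hd, ha, pvStepB, pvStepL, ih]
          | some l => simp [List.foldl_cons, hd, ha, pvStepB, pvStepL, ih]
      · simp [List.foldl_cons, pvStepB, hd, ha, ih]

-- once first and last are set, the letter fold shifts `last` through the middle buffer
theorem pv_stepL_run (rs : List Char) (r f l : Char) (m : List Char) :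
    (r :: rs).foldl pvStepL (some f, some l, m)
    = (some f, (r :: rs).getLast?, m ++ l :: (r :: rs).dropLast) := by
  induction rs generalizing r l m with
  | nil => simp [pvStepL]
  | cons r' rs' ih =>
    rw [List.foldl_cons, show pvStepL (some f, some l, m) r = (some f, some r, m ++ [l]) from rfl, ih]
    simp

-- the letter fold from the empty state, on a letter list with at least two elements
theorem pv_stepL_full (y z : Char) (mid : List Char) :
    (y :: (mid ++ [z])).foldl pvStepL (none, none, []) = (some y, some z, mid) := by
  rw [List.foldl_cons, show pvStepL (none, none, []) y = (some y, none, []) from rfl]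
  cases mid with
  | nil => simp [pvStepL]
  | cons m ms =>
    rw [List.cons_append, List.foldl_cons,
      show pvStepL (some y, none, []) m = (some y, some m, []) from rfl]
    cases hms : ms ++ [z] with
    | nil => simp at hms
    | cons r rs =>
      rw [pv_stepL_run]
      rw [← hms]
      simp

theorem pv_slice_singleton (z : Char) :
    PySem.List.slice [z] (some 1) (some (-1)) = [] := by
  simp [PySem.List.slice, PySem.List.clampIdx]

theorem pv_slice_mid (y z : Char) (mid : List Char) :
    PySem.List.slice (y :: mid ++ [z]) (some 1) (some (-1)) = mid := by
  have h : ¬((mid.length : Int) + 1 < 0) := by omega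
  simp [PySem.List.slice, PySem.List.clampIdx, h]

-- ===== VERDICT (by name: the statement is the Claim_ definition above) =====
theorem decode_word_spec : Claim_equal_decode_word := by
  intro word _ pre
  unfold Spec_decode_word
  obtain ⟨hls, hn⟩ := pre
  simp only [decode_word, decode_word_alt, pv_index_filter, pv_fold_split, List.nil_append]
  rcases h : PySem.Int.ofChars? (word.toList.filter (fun c => PySem.Chars.isdigit c)) with _ | n
  · simp [h] at hn
  · rcases List.eq_nil_or_concat' (word.toList.filter (fun c => PySem.Chars.isalpha c)) with hnil | ⟨ys, z, hc⟩
    · exact absurd hnil hls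
    · rw [hc]
      rcases ys with _ | ⟨y, mid⟩
      · simp only [List.nil_append]
        have hg : PySem.List.pyGet? [z] (-1) = some z := by
          rw [PySem.List.pyGet?_neg_one]; simp
        rw [hg]
        have hsl : PySem.List.slice [z] (some 1) (some (-1)) = [] := pv_slice_singleton z
        simp [hsl, pvStepL]
      · simp only [List.cons_append]
        have hg : PySem.List.pyGet? (y :: (mid ++ [z])) (-1) = some z := by
          rw [PySem.List.pyGet?_neg_one]
          rw [show (y :: (mid ++ [z])) = (y :: mid) ++ [z] by simp]
          exact List.getLast?_concat
        rw [hg]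
        have hsl : PySem.List.slice (y :: (mid ++ [z])) (some 1) (some (-1)) = mid :=
          pv_slice_mid y z mid
        rw [show (y :: (mid ++ [z])).foldl pvStepL (none, none, []) = (some y, some z, mid) from
          pv_stepL_full y z mid]
        simp [hsl]
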